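-- pv_equiv track=rewrite | github.com/sthompsonBP/NLPw2v | clustering_code.py | vector_sum
-- ===== SOURCE A (Python) =====
-- def vector_add(v, w):
--     """adds two vectors componentwise"""
--     return( [v_i + w_i for v_i, w_i in zip(v,w)])
--
-- def vector_sum(vectors):
--     total = []
--     for vec in vectors :
--         if total :
--             total = vector_add(total, vec)
--         else :
--             total = vec
--     return(total)
-- ===== SOURCE B (Python) =====
-- def vector_sum(vectors):
--     if not vectors:
--         return []
--     n = min(len(v) for v in vectors)
--     return [sum(v[i] for v in vectors) for i in range(n)]
-- ===== Notes on version B (the rewrite author's own statement) =====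
-- stated objective: alternative
-- what changed: Replaces A's row-major fold (repeated pairwise zip-adds into a running total, with truncation at each step) by a column-major formulation: compute the global minimum length once, then build each output component as the sum of that column across all vectors.
-- intended difference: On inputs that contain an empty vector but whose last vector is nonempty, A's falsy-check resets the running total and returns the sum of only the vectors after the last empty one, while B returns the empty list, the consistent min-length-truncation answer; A's value there discards data and is an accident of its 'if total:' test. — e.g. on vector_sum([[1, 2], [], [3]]): A returns [3], B returns []
import Mathlib
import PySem

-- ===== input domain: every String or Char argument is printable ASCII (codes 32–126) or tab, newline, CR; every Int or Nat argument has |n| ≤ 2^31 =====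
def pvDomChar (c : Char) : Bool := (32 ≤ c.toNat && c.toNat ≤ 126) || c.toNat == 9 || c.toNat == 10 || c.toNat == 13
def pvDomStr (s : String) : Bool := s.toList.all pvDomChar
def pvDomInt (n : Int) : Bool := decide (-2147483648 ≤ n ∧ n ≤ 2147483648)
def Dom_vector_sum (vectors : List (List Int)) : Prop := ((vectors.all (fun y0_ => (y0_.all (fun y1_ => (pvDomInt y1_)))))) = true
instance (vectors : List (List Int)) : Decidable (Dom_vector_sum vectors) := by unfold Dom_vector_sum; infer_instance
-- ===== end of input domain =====

-- B sums each column of the min-length-truncated input (column-major) instead of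
-- A's row-major fold of pairwise adds; 'alternative' objective, same cost.

-- ===== PORT A =====
def vector_add (v w : List Int) : List Int :=
  (v.zip w).map (fun p => p.1 + p.2)

-- loop body of A: 'if total: total = vector_add(total, vec) else: total = vec'
def stepA (total vec : List Int) : List Int :=
  if total ≠ [] then vector_add total vec else vec

def vector_sum (vectors : List (List Int)) : List Int :=
  vectors.foldl stepA []

-- ===== PORT B =====
-- Source B: n = min(len(v) for v in vectors); [sum(v[i] for v in vectors) for i in range(n)]
def vector_sum_alt (vectors : List (List Int)) : List Int :=
  match vectors with
  | [] => []
  | v0 :: rest =>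
    (List.range (rest.foldl (fun m v => min m v.length) v0.length)).map
      (fun i => (v0 :: rest).foldl (fun s v => s + v.getD i 0) 0)

-- ===== PRECONDITION & SPEC =====
-- On inputs containing an empty vector whose last vector is nonempty, A's falsy
-- 'if total:' resets the running total and returns the sum of only the vectors
-- after the last empty one, while B returns [] (the min-length truncation
-- answer); A's value there silently discards data and is an accident of its
-- implementation.
def D_vector_sum (vectors : List (List Int)) : Prop :=
  [] ∈ vectors ∧ vectors.getLast? ≠ some []
instance (vectors : List (List Int)) : Decidable (D_vector_sum vectors) := by
  unfold D_vector_sum; infer_instance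

def Spec_vector_sum (vectors : List (List Int)) (out : List Int) : Prop :=
  ¬ D_vector_sum vectors → out = vector_sum_alt vectors
instance (vectors : List (List Int)) (out : List Int) : Decidable (Spec_vector_sum vectors out) := by
  unfold Spec_vector_sum; infer_instance

def pvDiffWitness_vector_sum : List (List Int) := [[1, 2], [], [3]]
def pvDiffWitnessOut_vector_sum : (List Int) × (List Int) := ([3], [])

-- ===== CLAIM (what is proved, stated in full; the proofs are below) =====
def Claim_unchanged_vector_sum : Prop :=
  ∀ (vectors : List (List Int)), Dom_vector_sum vectors → Spec_vector_sum vectors (vector_sum vectors)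
def Claim_changed_vector_sum : Prop :=
  Dom_vector_sum (pvDiffWitness_vector_sum) ∧ D_vector_sum (pvDiffWitness_vector_sum) ∧
  vector_sum (pvDiffWitness_vector_sum) = pvDiffWitnessOut_vector_sum.1 ∧
  vector_sum_alt (pvDiffWitness_vector_sum) = pvDiffWitnessOut_vector_sum.2 ∧
  pvDiffWitnessOut_vector_sum.1 ≠ pvDiffWitnessOut_vector_sum.2
def Claim_exact_vector_sum : Prop :=
  ∀ (vectors : List (List Int)), Dom_vector_sum vectors → D_vector_sum vectors →
    vector_sum vectors ≠ vector_sum_alt vectors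

-- ===== LEMMAS AND PROOFS =====

lemma vector_add_length (v w : List Int) :
    (vector_add v w).length = min v.length w.length := by
  simp [vector_add]

lemma vector_add_nil (v : List Int) : vector_add v [] = [] := by
  simp [vector_add]

lemma vector_add_getD (v w : List Int) (i : Nat) (hv : i < v.length) (hw : i < w.length) :
    (vector_add v w).getD i 0 = v.getD i 0 + w.getD i 0 := by
  have hlen : i < (vector_add v w).length := by
    rw [vector_add_length]; omega
  rw [List.getD_eq_getElem _ _ hlen, List.getD_eq_getElem _ _ hv, List.getD_eq_getElem _ _ hw]
  simp [vector_add]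

lemma vector_add_ne_nil (v w : List Int) (hv : v ≠ []) (hw : w ≠ []) :
    vector_add v w ≠ [] := by
  intro h
  have hl := vector_add_length v w
  rw [h] at hl
  simp only [List.length_nil] at hl
  rcases Nat.min_eq_zero_iff.mp hl.symm with h' | h'
  · exact hv (List.eq_nil_of_length_eq_zero h')
  · exact hw (List.eq_nil_of_length_eq_zero h')

lemma foldl_min_le_init (l : List (List Int)) (m : Nat) :
    l.foldl (fun a v => min a v.length) m ≤ m := by
  induction l generalizing m with
  | nil => simp
  | cons w tl ih => exact le_trans (ih (min m w.length)) (by omega)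

lemma foldl_min_zero (l : List (List Int)) (m : Nat) (h : ([] : List Int) ∈ l) :
    l.foldl (fun a v => min a v.length) m = 0 := by
  induction l generalizing m with
  | nil => simp at h
  | cons w tl ih =>
    rcases List.mem_cons.mp h with h | h
    · rw [← h]
      simp only [List.foldl_cons, List.length_nil, Nat.min_zero]
      have h2 := foldl_min_le_init tl 0
      omega
    · exact ih _ h

lemma main_lemma :
    ∀ (rest : List (List Int)) (v : List Int), v ≠ [] → (∀ w ∈ rest, w ≠ []) →
      rest.foldl stepA v =
        (List.range (rest.foldl (fun m u => min m u.length) v.length)).map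
          (fun i => (v :: rest).foldl (fun s u => s + u.getD i 0) 0) := by
  intro rest
  induction rest with
  | nil =>
    intro v hv _
    simp only [List.foldl_nil]
    apply List.ext_getElem
    · simp
    · intro i h1 h2
      simp [List.getD, List.getElem?_eq_getElem h1]
  | cons w tl ih =>
    intro v hv hall
    have hw : w ≠ [] := hall w (by simp)
    have hvw : vector_add v w ≠ [] := vector_add_ne_nil v w hv hw
    have hstep : (w :: tl).foldl stepA v = tl.foldl stepA (vector_add v w) := by
      simp [stepA, hv]
    rw [hstep, ih (vector_add v w) hvw (fun u hu => hall u (by simp [hu]))]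
    have hn : tl.foldl (fun m u => min m u.length) (vector_add v w).length
        = (w :: tl).foldl (fun m u => min m u.length) v.length := by
      simp [vector_add_length]
    rw [hn]
    apply List.map_congr_left
    intro i hi
    have hiN : i < (w :: tl).foldl (fun m u => min m u.length) v.length := List.mem_range.mp hi
    have hle : (w :: tl).foldl (fun m u => min m u.length) v.length ≤ min v.length w.length := by
      simpa using foldl_min_le_init tl (min v.length w.length)
    have hiv : i < v.length := by omega
    have hiw : i < w.length := by omega
    simp only [List.foldl_cons]
    congr 1
    rw [vector_add_getD v w i hiv hiw]
    ring

lemma stepA_ne_nil (total v : List Int) (hv : v ≠ []) : stepA total v ≠ [] := by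
  unfold stepA
  split_ifs with h
  · exact vector_add_ne_nil total v h hv
  · exact hv

lemma foldl_stepA_last_nil :
    ∀ (vs : List (List Int)) (total : List Int), vs.getLast? = some [] →
      vs.foldl stepA total = [] := by
  intro vs
  induction vs with
  | nil => intro total h; simp at h
  | cons v tl ih =>
    intro total h
    cases tl with
    | nil =>
      simp only [List.getLast?_singleton, Option.some.injEq] at h
      subst h
      by_cases ht : total = [] <;> simp [stepA, ht, vector_add_nil]
    | cons w tl' =>
      simp only [List.foldl_cons]
      exact ih _ (by rwa [List.getLast?_cons_cons] at h)

lemma foldl_stepA_last_ne :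
    ∀ (vs : List (List Int)) (total : List Int), vs.getLast? ≠ some [] → vs ≠ [] →
      vs.foldl stepA total ≠ [] := by
  intro vs
  induction vs with
  | nil => intro total _ h; exact absurd rfl h
  | cons v tl ih =>
    intro total h _
    cases tl with
    | nil =>
      have hv : v ≠ [] := by
        simp only [List.getLast?_singleton] at h
        intro h'; exact h (by rw [h'])
      simpa using stepA_ne_nil total v hv
    | cons w tl' =>
      simp only [List.foldl_cons]
      exact ih _ (by rwa [List.getLast?_cons_cons] at h) (by simp)

lemma alt_nil_of_mem (vectors : List (List Int)) (h : ([] : List Int) ∈ vectors) :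
    vector_sum_alt vectors = [] := by
  cases vectors with
  | nil => rfl
  | cons v0 rest =>
    rcases List.mem_cons.mp h with h0 | h0
    · subst h0
      have h2 := foldl_min_le_init rest (([] : List Int)).length
      simp only [List.length_nil, Nat.le_zero] at h2
      simp [vector_sum_alt, h2]
    · simp [vector_sum_alt, foldl_min_zero rest _ h0]

-- ===== VERDICT (by name: the statement is the Claim_ definition above) =====
theorem vector_sum_spec : Claim_unchanged_vector_sum := by
  intro vectors _ hnD
  cases vectors with
  | nil => rfl
  | cons v0 rest =>
    by_cases hmem : ([] : List Int) ∈ v0 :: rest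
    · have hlast : (v0 :: rest).getLast? = some [] := by
        by_contra h
        exact hnD ⟨hmem, h⟩
      show (v0 :: rest).foldl stepA [] = vector_sum_alt (v0 :: rest)
      rw [foldl_stepA_last_nil _ _ hlast, alt_nil_of_mem _ hmem]
    · have hv0 : v0 ≠ [] := fun h => hmem (by simp [← h])
      have hall : ∀ w ∈ rest, w ≠ [] := fun w hw h => hmem (List.mem_cons_of_mem _ (h ▸ hw))
      have h1 : vector_sum (v0 :: rest) = rest.foldl stepA v0 := by
        simp [vector_sum, stepA]
      rw [h1, main_lemma rest v0 hv0 hall]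
      rfl

theorem vector_sum_changed : Claim_changed_vector_sum := by
  unfold Claim_changed_vector_sum; decide

theorem vector_sum_tight : Claim_exact_vector_sum := by
  intro vectors _ hD
  obtain ⟨hmem, hlast⟩ := hD
  rw [alt_nil_of_mem vectors hmem]
  exact foldl_stepA_last_ne vectors [] hlast (by rintro rfl; simp at hmem)
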